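-- pv_equiv track=rewrite | github.com/pythonfixer/python_work | work8_11.py | make_great
-- ===== SOURCE A (Python) =====
-- def make_great(names):
--     great_names = []
--     names_bak = []
--     while names:
--         name = names.pop()
--         name = 'the Great ' + name
--         great_names.append(name)
--
--     while great_names:
--         name = great_names.pop()
--         names_bak.append(name)
--     return names_bak
-- ===== SOURCE B (Python) =====
-- def make_great(names):
--     result = ['the Great ' + name for name in names]
--     names.clear()
--     return result
-- ===== Notes on version B (the rewrite author's own statement) =====
-- stated objective: simpler
-- what changed: Replaces A's two destructive stack-reversal pop loops and the intermediate great_names buffer with a single forward comprehension plus an explicit clear() to reproduce the emptying side effect.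
import Mathlib
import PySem

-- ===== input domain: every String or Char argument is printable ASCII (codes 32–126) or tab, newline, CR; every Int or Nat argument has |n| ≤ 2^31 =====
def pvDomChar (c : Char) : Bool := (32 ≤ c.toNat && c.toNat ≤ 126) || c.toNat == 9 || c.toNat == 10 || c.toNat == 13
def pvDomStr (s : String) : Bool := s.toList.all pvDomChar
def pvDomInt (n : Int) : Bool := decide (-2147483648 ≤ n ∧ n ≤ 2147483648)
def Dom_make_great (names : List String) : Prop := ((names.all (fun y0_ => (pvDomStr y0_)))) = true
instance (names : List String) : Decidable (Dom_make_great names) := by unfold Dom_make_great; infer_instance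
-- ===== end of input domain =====

-- B replaces A's two destructive pop loops with one forward map plus an explicit clear;
-- both empty the input list in Python, and the equivalence proved here is about the return value.

-- ===== PORT A =====
-- first while loop: pop from the end of `names`, prefix, append to `great_names`
def mgLoop1 (names great_names : List String) : List String :=
  if h : names = [] then great_names
  else mgLoop1 names.dropLast (great_names ++ ["the Great " ++ names.getLast!])
termination_by names.length
decreasing_by
  have : names.length ≠ 0 := fun h0 => h (List.eq_nil_of_length_eq_zero h0)
  simp [List.length_dropLast]; omega

-- second while loop: pop from the end of `great_names`, append to `names_bak`
def mgLoop2 (great_names names_bak : List String) : List String :=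
  if h : great_names = [] then names_bak
  else mgLoop2 great_names.dropLast (names_bak ++ [great_names.getLast!])
termination_by great_names.length
decreasing_by
  have : great_names.length ≠ 0 := fun h0 => h (List.eq_nil_of_length_eq_zero h0)
  simp [List.length_dropLast]; omega

def make_great (names : List String) : List String :=
  mgLoop2 (mgLoop1 names []) []

-- ===== PORT B =====
def make_great_alt (names : List String) : List String :=
  names.map (fun name => "the Great " ++ name)

-- ===== PRECONDITION & SPEC =====
def Spec_make_great (names : List String) (out : List String) : Prop := out = make_great_alt names
instance (names : List String) (out : List String) : Decidable (Spec_make_great names out) := by unfold Spec_make_great; infer_instance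

-- ===== CLAIM (what is proved, stated in full; the proofs are below) =====
def Claim_equal_make_great : Prop := ∀ (names : List String), Dom_make_great names → Spec_make_great names (make_great names)

-- ===== LEMMAS AND PROOFS =====
theorem getLast!_concat' (ys : List String) (y : String) : (ys ++ [y]).getLast! = y := by
  induction ys with
  | nil => rfl
  | cons a t ih => cases t <;> simp_all [List.getLast!]
theorem mgLoop1_eq (names : List String) : ∀ acc,
    mgLoop1 names acc = acc ++ (names.reverse.map (fun n => "the Great " ++ n)) := by
  induction names using List.reverseRecOn with
  | nil => intro acc; simp [mgLoop1]
  | append_singleton ys y ih =>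
      intro acc
      rw [mgLoop1]
      rw [dif_neg (by simp), List.dropLast_concat, getLast!_concat', ih]
      simp

theorem mgLoop2_eq (xs : List String) : ∀ acc,
    mgLoop2 xs acc = acc ++ xs.reverse := by
  induction xs using List.reverseRecOn with
  | nil => intro acc; simp [mgLoop2]
  | append_singleton ys y ih =>
      intro acc
      rw [mgLoop2]
      rw [dif_neg (by simp), List.dropLast_concat, getLast!_concat', ih]
      simp

-- ===== VERDICT (by name: the statement is the Claim_ definition above) =====
theorem make_great_spec : Claim_equal_make_great := by
  intro names _
  show make_great names = make_great_alt names
  simp [make_great, make_great_alt, mgLoop1_eq, mgLoop2_eq]
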